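-- pv_equiv track=rewrite | github.com/yaghesh369/respofin | backend/recommendations/services.py | _exclude_active_product
-- ===== SOURCE A (Python) =====
-- PRODUCT_FAMILIES = {
--     "credit card": {
--         "credit card",
--         "credit card silver",
--         "credit card gold",
--         "credit card platinum",
--         "travel credit card",
--     },
--     "fixed deposit": {
--         "fixed deposit",
--         "premium fixed deposit",
--         "tax saver fd",
--     },
--     "savings account": {
--         "savings account",
--         "basic savings",
--         "premium savings",
--         "digital savings",
--         "salary account plus",
--         "salary account premium",
--         "family savings plan",
--         "senior savings plus",
--     },
--     "wealth management": {
--         "wealth management",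
--         "portfolio advisory",
--     },
-- }
--
-- def _normalize_product_name(value):
--     return " ".join(str(value or "").strip().lower().split())
--
-- def _canonical_product_name(value):
--     normalized = _normalize_product_name(value)
--     for canonical, family in PRODUCT_FAMILIES.items():
--         if normalized in family:
--             return canonical
--     return normalized
--
-- def _exclude_active_product(products, active_product):
--     active_key = _canonical_product_name(active_product)
--     if not active_key:
--         return list(products)
--
--     return [
--         product
--         for product in products
--         if _canonical_product_name(product) != active_key
--     ]
-- ===== SOURCE B (Python) =====
-- PRODUCT_FAMILIES = {
--     "credit card": {
--         "credit card",
--         "credit card silver",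
--         "credit card gold",
--         "credit card platinum",
--         "travel credit card",
--     },
--     "fixed deposit": {
--         "fixed deposit",
--         "premium fixed deposit",
--         "tax saver fd",
--     },
--     "savings account": {
--         "savings account",
--         "basic savings",
--         "premium savings",
--         "digital savings",
--         "salary account plus",
--         "salary account premium",
--         "family savings plan",
--         "senior savings plus",
--     },
--     "wealth management": {
--         "wealth management",
--         "portfolio advisory",
--     },
-- }
--
--
-- def _normalize_product_name(value):
--     return " ".join(str(value or "").strip().lower().split())
--
--
-- def _exclude_active_product(products, active_product):
--     active_norm = _normalize_product_name(active_product)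
--     if not active_norm:
--         return list(products)
--     family = None
--     for members in PRODUCT_FAMILIES.values():
--         if active_norm in members:
--             family = members
--             break
--     if family is None:
--         family = {active_norm}
--     return [p for p in products if _normalize_product_name(p) not in family]
-- ===== Notes on version B (the rewrite author's own statement) =====
-- stated objective: faster
-- what changed: B resolves the active product's family set once with a single scan of PRODUCT_FAMILIES (falling back to {active_norm} when not found), then filters by normalized-name set membership, instead of re-canonicalizing every product against all families.
import Mathlib
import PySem

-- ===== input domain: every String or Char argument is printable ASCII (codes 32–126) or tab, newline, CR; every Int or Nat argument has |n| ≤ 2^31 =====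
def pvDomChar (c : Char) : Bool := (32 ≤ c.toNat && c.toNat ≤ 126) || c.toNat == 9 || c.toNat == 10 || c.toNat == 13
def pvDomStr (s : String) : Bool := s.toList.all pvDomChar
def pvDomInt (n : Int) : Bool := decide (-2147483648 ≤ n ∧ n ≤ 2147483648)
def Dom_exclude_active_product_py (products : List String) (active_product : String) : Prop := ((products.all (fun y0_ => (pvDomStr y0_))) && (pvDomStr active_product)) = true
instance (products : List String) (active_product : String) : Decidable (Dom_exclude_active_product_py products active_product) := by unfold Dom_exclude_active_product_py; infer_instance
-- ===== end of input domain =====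

-- B resolves the active product's family set once and filters by normalized-name membership,
-- instead of canonicalizing every product against all families (alternative decomposition).


-- ===== PORT A =====
-- PRODUCT_FAMILIES: module-level dict of sets, in insertion order (each set written as its distinct elements)
def pvF1 : List String := ["credit card", "credit card silver", "credit card gold", "credit card platinum", "travel credit card"]
def pvF2 : List String := ["fixed deposit", "premium fixed deposit", "tax saver fd"]
def pvF3 : List String := ["savings account", "basic savings", "premium savings", "digital savings", "salary account plus", "salary account premium", "family savings plan", "senior savings plus"]
def pvF4 : List String := ["wealth management", "portfolio advisory"]
def pvProductFamilies : List (String × List String) :=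
  [("credit card", pvF1), ("fixed deposit", pvF2), ("savings account", pvF3), ("wealth management", pvF4)]

-- _normalize_product_name: " ".join(str(value or "").strip().lower().split()); for a str value, str(value or "") = value
def pvNormalize (value : String) : String :=
  PySem.Str.join " " (PySem.Str.split₀ (PySem.Str.lower (PySem.Str.strip value)))

-- _canonical_product_name: first family containing the normalized name, else the normalized name
def pvCanonical (value : String) : String :=
  let normalized := pvNormalize value
  match pvProductFamilies.find? (fun fam => fam.2.contains normalized) with
  | some fam => fam.1
  | none => normalized

def exclude_active_product_py (products : List String) (active_product : String) : List String :=
  let active_key := pvCanonical active_product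
  if active_key = "" then products
  else products.filter (fun product => pvCanonical product ≠ active_key)

-- ===== PORT B =====
def exclude_active_product_py_alt (products : List String) (active_product : String) : List String :=
  let active_norm := pvNormalize active_product
  if active_norm = "" then products
  else
    -- single scan of PRODUCT_FAMILIES.values() for the family containing active_norm (None sentinel)
    let family? := (pvProductFamilies.map Prod.snd).find? (fun members => members.contains active_norm)
    let family := match family? with
      | some members => members
      | none => [active_norm]
    products.filter (fun p => !(family.contains (pvNormalize p)))

-- ===== PRECONDITION & SPEC =====
def Spec_exclude_active_product_py (products : List String) (active_product : String) (out : List String) : Prop := out = exclude_active_product_py_alt products active_product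
instance (products : List String) (active_product : String) (out : List String) : Decidable (Spec_exclude_active_product_py products active_product out) := by unfold Spec_exclude_active_product_py; infer_instance

-- ===== CLAIM (what is proved, stated in full; the proofs are below) =====
def Claim_equal_exclude_active_product_py : Prop := ∀ (products : List String) (active_product : String), Dom_exclude_active_product_py products active_product → Spec_exclude_active_product_py products active_product (exclude_active_product_py products active_product)

-- ===== LEMMAS AND PROOFS =====

-- proof-side views of A's canonicalization and B's family resolution, as functions of the normalized name
def pvCanonRaw (n : String) : String :=
  match pvProductFamilies.find? (fun fam => fam.2.contains n) with
  | some fam => fam.1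
  | none => n

def pvFamOf (n : String) : List String :=
  match (pvProductFamilies.map Prod.snd).find? (fun members => members.contains n) with
  | some members => members
  | none => [n]

theorem pvCanonical_eq (v : String) : pvCanonical v = pvCanonRaw (pvNormalize v) := by
  unfold pvCanonical pvCanonRaw
  generalize pvNormalize v = x
  rfl

-- B's family lookup is driven by the same find? as A's canonicalization
theorem pvFamOf_eq (n : String) :
    pvFamOf n = (match pvProductFamilies.find? (fun fam => fam.2.contains n) with
      | some fam => fam.2
      | none => [n]) := by
  unfold pvFamOf
  rw [List.find?_map]
  have hp : ((fun members => members.contains n) ∘ Prod.snd : String × List String → Bool)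
      = (fun fam => fam.2.contains n) := rfl
  rw [hp]
  cases pvProductFamilies.find? (fun fam => fam.2.contains n) <;> rfl

-- each canonical key belongs to its own family
theorem pvKeyMem : ∀ f ∈ pvProductFamilies, f.1 ∈ f.2 := by decide

-- the family sets are pairwise disjoint
theorem pvDisjoint : ∀ f ∈ pvProductFamilies, ∀ g ∈ pvProductFamilies, ∀ x ∈ f.2, x ∈ g.2 → f = g := by decide

-- no family contains the empty string
theorem pvNoEmpty : ∀ f ∈ pvProductFamilies, "" ∉ f.2 := by decide

theorem pvCanonRaw_empty_iff (n : String) : pvCanonRaw n = "" ↔ n = "" := by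
  unfold pvCanonRaw
  cases hn : pvProductFamilies.find? (fun fam => fam.2.contains n) with
  | none => simp
  | some f =>
    have hf2 : n ∈ f.2 := by simpa using List.find?_some hn
    have hfmem : f ∈ pvProductFamilies := List.mem_of_find?_eq_some hn
    simp only
    constructor
    · intro h
      exact absurd (h ▸ pvKeyMem f hfmem) (pvNoEmpty f hfmem)
    · intro h
      exact absurd (h ▸ hf2) (pvNoEmpty f hfmem)

theorem pvCanonRaw_eq_iff (n m : String) : pvCanonRaw m = pvCanonRaw n ↔ m ∈ pvFamOf n := by
  rw [pvFamOf_eq]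
  unfold pvCanonRaw
  cases hn : pvProductFamilies.find? (fun fam => fam.2.contains n) with
  | none =>
    have hnone : ∀ f ∈ pvProductFamilies, ¬ (n ∈ f.2) := by
      intro f hf
      simpa using List.find?_eq_none.mp hn f hf
    cases hm : pvProductFamilies.find? (fun fam => fam.2.contains m) with
    | none => simp
    | some g =>
      have hg2 : m ∈ g.2 := by simpa using List.find?_some hm
      have hgmem : g ∈ pvProductFamilies := List.mem_of_find?_eq_some hm
      simp only [List.mem_singleton]
      constructor
      · intro h
        exact absurd (h ▸ pvKeyMem g hgmem) (hnone g hgmem)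
      · intro h
        exact absurd (h ▸ hg2) (hnone g hgmem)
  | some f =>
    have hf2 : n ∈ f.2 := by simpa using List.find?_some hn
    have hfmem : f ∈ pvProductFamilies := List.mem_of_find?_eq_some hn
    cases hm : pvProductFamilies.find? (fun fam => fam.2.contains m) with
    | none =>
      have hnone : ∀ g ∈ pvProductFamilies, ¬ (m ∈ g.2) := by
        intro g hg
        simpa using List.find?_eq_none.mp hm g hg
      simp only
      constructor
      · intro h
        exact absurd (h ▸ pvKeyMem f hfmem) (hnone f hfmem)
      · intro h
        exact absurd h (hnone f hfmem)
    | some g =>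
      have hg2 : m ∈ g.2 := by simpa using List.find?_some hm
      have hgmem : g ∈ pvProductFamilies := List.mem_of_find?_eq_some hm
      simp only
      constructor
      · intro h
        -- g.1 = f.1, and f.1 ∈ both families, so f = g by disjointness
        have : g = f := pvDisjoint g hgmem f hfmem g.1 (pvKeyMem g hgmem) (h ▸ pvKeyMem f hfmem)
        exact this ▸ hg2
      · intro h
        have : g = f := pvDisjoint g hgmem f hfmem m hg2 h
        exact congrArg Prod.fst this

-- ===== VERDICT (by name: the statement is the Claim_ definition above) =====
theorem exclude_active_product_py_spec : Claim_equal_exclude_active_product_py := by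
  intro products active_product _
  unfold Spec_exclude_active_product_py exclude_active_product_py exclude_active_product_py_alt
  simp only [pvCanonical_eq]
  generalize pvNormalize active_product = n
  by_cases hkey : pvCanonRaw n = ""
  · rw [if_pos hkey, if_pos ((pvCanonRaw_empty_iff n).mp hkey)]
  · rw [if_neg hkey, if_neg fun h => hkey ((pvCanonRaw_empty_iff n).mpr h)]
    apply List.filter_congr
    intro p _
    show decide (pvCanonRaw (pvNormalize p) ≠ pvCanonRaw n) = !((pvFamOf n).contains (pvNormalize p))
    have hiff := pvCanonRaw_eq_iff n (pvNormalize p)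
    by_cases h : pvCanonRaw (pvNormalize p) = pvCanonRaw n
    · simp [h, hiff.mp h]
    · have hnm : pvNormalize p ∉ pvFamOf n := fun hc => h (hiff.mpr hc)
      simp [h, hnm]
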